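-- pv_equiv track=rewrite | github.com/redmage123/artemis | src/java_framework/analyzer/technology_detector.py | detect_test_frameworks
-- ===== SOURCE A (Python) =====
-- from typing import Dict, List, Optional, Tuple
--
-- def detect_test_frameworks(dependencies: Dict[str, str]) -> List[str]:
--     """
--     WHY: Identifies testing frameworks
--     RESPONSIBILITY: Checks for test framework dependencies
--
--     Args:
--         dependencies: Project dependencies
--
--     Returns:
--         List of test frameworks
--     """
--     frameworks = []
--
--     # Dispatch table for test framework detection
--     test_checks: Dict[str, str] = {
--         "junit": "JUnit",
--         "testng": "TestNG",
--         "mockito": "Mockito",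
--         "rest-assured": "REST Assured",
--         "spring-boot-starter-test": "Spring Boot Test",
--     }
--
--     for keyword, framework_name in test_checks.items():
--         if any(keyword in dep for dep in dependencies):
--             frameworks.append(framework_name)
--
--     return frameworks
-- ===== SOURCE B (Python) =====
-- def detect_test_frameworks(dependencies):
--     test_checks = {
--         "junit": "JUnit",
--         "testng": "TestNG",
--         "mockito": "Mockito",
--         "rest-assured": "REST Assured",
--         "spring-boot-starter-test": "Spring Boot Test",
--     }
--     # No keyword contains a newline, so a keyword occurs in some dependency
--     # iff it occurs in the newline-joined text of all dependency names.
--     joined = "\n".join(dependencies)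
--     return [name for keyword, name in test_checks.items() if keyword in joined]
-- ===== Notes on version B (the rewrite author's own statement) =====
-- stated objective: alternative
-- what changed: B joins all dependency names into one newline-separated text and runs each of the five keyword containment tests once against that combined text (correct because no keyword contains a newline), instead of A's per-keyword any()-scan over the individual dependencies.
import Mathlib
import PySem

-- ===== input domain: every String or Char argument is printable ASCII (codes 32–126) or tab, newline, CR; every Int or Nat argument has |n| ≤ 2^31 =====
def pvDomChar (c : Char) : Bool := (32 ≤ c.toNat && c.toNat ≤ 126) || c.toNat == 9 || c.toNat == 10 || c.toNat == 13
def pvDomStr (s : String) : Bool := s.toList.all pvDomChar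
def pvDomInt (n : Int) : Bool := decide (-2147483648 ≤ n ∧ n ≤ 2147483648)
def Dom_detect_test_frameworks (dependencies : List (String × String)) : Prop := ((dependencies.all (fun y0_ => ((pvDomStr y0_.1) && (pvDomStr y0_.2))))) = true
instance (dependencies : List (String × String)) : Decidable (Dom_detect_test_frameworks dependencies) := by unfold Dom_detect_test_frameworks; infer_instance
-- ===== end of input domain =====

-- B joins all dependency names into one newline-separated text and tests each keyword once
-- against it (no keyword contains a newline), instead of A's per-keyword scan over the
-- individual dependencies (objective: alternative).


-- the dispatch table shared (as a literal) by both Pythons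
def pvTestChecks : List (String × String) :=
  [("junit", "JUnit"), ("testng", "TestNG"), ("mockito", "Mockito"),
   ("rest-assured", "REST Assured"), ("spring-boot-starter-test", "Spring Boot Test")]

-- ===== PORT A =====
-- for keyword, name in table: if any(keyword in dep for dep in dependencies): frameworks.append(name)
-- (iterating a Python dict yields its keys, i.e. the first components)
def detect_test_frameworks (dependencies : List (String × String)) : List String :=
  pvTestChecks.foldl
    (fun frameworks kv =>
      if dependencies.any (fun dep => PySem.Str.isIn kv.1 dep.1) then frameworks ++ [kv.2]
      else frameworks) []

-- ===== PORT B =====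
-- joined = "\n".join(dependencies); [name for keyword, name in table.items() if keyword in joined]
def detect_test_frameworks_alt (dependencies : List (String × String)) : List String :=
  let joined := PySem.Str.join "\n" (dependencies.map Prod.fst)
  pvTestChecks.filterMap (fun kv => if PySem.Str.isIn kv.1 joined then some kv.2 else none)

-- ===== PRECONDITION & SPEC =====
def Spec_detect_test_frameworks (dependencies : List (String × String)) (out : List String) : Prop := out = detect_test_frameworks_alt dependencies
instance (dependencies : List (String × String)) (out : List String) : Decidable (Spec_detect_test_frameworks dependencies out) := by unfold Spec_detect_test_frameworks; infer_instance

-- ===== CLAIM (what is proved, stated in full; the proofs are below) =====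
def Claim_equal_detect_test_frameworks : Prop := ∀ (dependencies : List (String × String)), Dom_detect_test_frameworks dependencies → Spec_detect_test_frameworks dependencies (detect_test_frameworks dependencies)

-- ===== LEMMAS AND PROOFS =====

-- a list comprehension '[f x for x in l if q x]' as filter-then-map
theorem filterMap_if_eq {α β : Type} (l : List α) (q : α → Bool) (f : α → β) :
    l.filterMap (fun x => if q x then some (f x) else none) = (l.filter q).map f := by
  induction l with
  | nil => rfl
  | cons a t ih => by_cases h : q a <;> simp [h, ih]

-- a pattern avoiding the separator is a prefix of 'l1 ++ sep :: l2' iff it is a prefix of l1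
theorem prefix_through_sep {α : Type} (sep : α) (kw l1 l2 : List α) (h : sep ∉ kw) :
    kw <+: (l1 ++ sep :: l2) ↔ kw <+: l1 := by
  induction kw generalizing l1 with
  | nil => simp
  | cons k kw' ih =>
    cases l1 with
    | nil =>
      simp only [List.nil_append, List.cons_prefix_cons, List.prefix_nil]
      constructor
      · rintro ⟨rfl, -⟩; exact absurd List.mem_cons_self h
      · intro hc; simp at hc
    | cons a l1' =>
      simp only [List.cons_append, List.cons_prefix_cons]
      exact and_congr_right fun _ => ih l1' (fun hm => h (List.mem_cons_of_mem _ hm))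

-- a pattern avoiding the separator is an infix of 'l1 ++ sep :: l2' iff of l1 or of l2
theorem infix_through_sep {α : Type} (sep : α) (kw l1 l2 : List α) (h : sep ∉ kw) :
    kw <:+: (l1 ++ sep :: l2) ↔ kw <:+: l1 ∨ kw <:+: l2 := by
  induction l1 with
  | nil =>
    simp only [List.nil_append, List.infix_cons_iff]
    rw [show (kw <+: sep :: l2) ↔ kw <+: ([] : List α) from prefix_through_sep sep kw [] l2 h]
    simp
  | cons a l1' ih =>
    rw [List.cons_append, List.infix_cons_iff,
        show (kw <+: a :: (l1' ++ sep :: l2)) ↔ kw <+: a :: l1' from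
          prefix_through_sep sep kw (a :: l1') l2 h, ih, List.infix_cons_iff, or_assoc]

-- a nonempty newline-free pattern occurs in the newline-join iff it occurs in some piece
theorem infix_join_iff (kw : List Char) (h : ('\n' : Char) ∉ kw) (hne : kw ≠ [])
    (parts : List (List Char)) :
    kw <:+: PySem.Chars.join ['\n'] parts ↔ ∃ d ∈ parts, kw <:+: d := by
  induction parts with
  | nil => simp [PySem.Chars.join_nil, List.infix_nil, hne]
  | cons d rest ih =>
    cases rest with
    | nil => simp [PySem.Chars.join_singleton]
    | cons e t =>
      rw [PySem.Chars.join_cons_cons, List.append_assoc, List.singleton_append,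
          infix_through_sep '\n' kw d _ h, ih]
      simp only [List.mem_cons]
      constructor
      · rintro (hd | ⟨x, hx, hkx⟩)
        · exact ⟨d, Or.inl rfl, hd⟩
        · exact ⟨x, Or.inr hx, hkx⟩
      · rintro ⟨x, rfl | hx, hkx⟩
        · exact Or.inl hkx
        · exact Or.inr ⟨x, hx, hkx⟩

-- 'any(kw in dep for dep in deps)' equals 'kw in "\n".join(deps)' for a nonempty newline-free kw
theorem any_eq_isIn_join (kw : String) (h : ('\n' : Char) ∉ kw.toList) (hne : kw.toList ≠ [])
    (deps : List (String × String)) :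
    deps.any (fun dep => PySem.Str.isIn kw dep.1)
      = PySem.Str.isIn kw (PySem.Str.join "\n" (deps.map Prod.fst)) := by
  apply Bool.eq_iff_iff.mpr
  rw [PySem.Str.isIn_iff_infix, PySem.Str.toList_join,
      show ("\n" : String).toList = ['\n'] from rfl,
      infix_join_iff kw.toList h hne]
  simp only [List.any_eq_true, List.map_map, List.mem_map, PySem.Str.isIn_iff_infix]
  constructor
  · rintro ⟨dep, hd, hin⟩; exact ⟨dep.1.toList, ⟨dep, hd, rfl⟩, hin⟩
  · rintro ⟨x, ⟨dep, hd, rfl⟩, hin⟩; exact ⟨dep, hd, hin⟩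

-- every keyword in the table is nonempty and newline-free
theorem table_keywords_ok :
    ∀ kv ∈ pvTestChecks, ('\n' : Char) ∉ kv.1.toList ∧ kv.1.toList ≠ [] := by decide

-- ===== VERDICT (by name: the statement is the Claim_ definition above) =====
theorem detect_test_frameworks_spec : Claim_equal_detect_test_frameworks := by
  intro deps _
  show detect_test_frameworks deps = detect_test_frameworks_alt deps
  unfold detect_test_frameworks detect_test_frameworks_alt
  rw [PySem.List.foldl_append_if, filterMap_if_eq, List.nil_append]
  congr 1
  apply List.filter_congr
  intro kv hkv
  obtain ⟨h1, h2⟩ := table_keywords_ok kv hkv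
  exact any_eq_isIn_join kv.1 h1 h2 deps
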